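-- pv_equiv track=rewrite | github.com/Rida-Zubair/i23-2590-NLP-Assignment2 | part1_build_tfidf_ppmi.py | semantic_color_map
-- ===== SOURCE A (Python) =====
-- def semantic_color_map(tokens):
--     mapping = {}
--     for tok in tokens:
--         t = tok.lower()
--         if t in {'pakistan', 'hukumat', 'wazir', 'siyasat'}:
--             mapping[tok] = 'politics'
--         elif t in {'cricket', 'match', 'team', 'player'}:
--             mapping[tok] = 'sports'
--         elif t in {'shehar', 'lahore', 'karachi', 'islamabad'}:
--             mapping[tok] = 'geography'
--         else:
--             mapping[tok] = 'other'
--     return mapping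
-- ===== SOURCE B (Python) =====
-- def semantic_color_map(tokens):
--     # Staged: dedupe tokens first, then one relabeling pass per category
--     # over the parallel label list, then zip keys with labels.
--     uniq = list(dict.fromkeys(tokens))
--     labels = ['other'] * len(uniq)
--     for cat, words in [('politics', {'pakistan', 'hukumat', 'wazir', 'siyasat'}),
--                        ('sports', {'cricket', 'match', 'team', 'player'}),
--                        ('geography', {'shehar', 'lahore', 'karachi', 'islamabad'})]:
--         labels = [cat if tok.lower() in words else lab
--                   for tok, lab in zip(uniq, labels)]
--     return dict(zip(uniq, labels))
-- ===== Notes on version B (the rewrite author's own statement) =====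
-- stated objective: alternative
-- what changed: Instead of A's single loop that classifies each token with an if/elif membership chain while building the dict, B first deduplicates the tokens (dict.fromkeys), starts a parallel label list of 'other', makes one relabeling pass over that list per category (three staged zip passes), and finally zips keys with labels into the dict; correct because the keyword sets are disjoint, so pass order cannot matter.
import Mathlib
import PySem

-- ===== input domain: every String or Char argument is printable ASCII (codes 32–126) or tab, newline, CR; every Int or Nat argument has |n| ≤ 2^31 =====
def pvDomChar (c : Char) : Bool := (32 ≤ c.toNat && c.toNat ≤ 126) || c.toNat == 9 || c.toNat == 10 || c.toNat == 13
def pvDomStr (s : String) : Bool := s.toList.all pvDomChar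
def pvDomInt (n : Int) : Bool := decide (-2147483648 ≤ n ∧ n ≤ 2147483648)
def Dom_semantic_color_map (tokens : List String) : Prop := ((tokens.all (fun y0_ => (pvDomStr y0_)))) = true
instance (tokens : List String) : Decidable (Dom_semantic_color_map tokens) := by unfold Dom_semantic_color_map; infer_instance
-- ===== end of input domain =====

-- B restructures A's one classify-as-you-insert loop into staged passes: dedupe the tokens,
-- then one relabeling pass over a parallel label list per category, then zip keys with labels.

-- ===== PORT A =====
def semantic_color_map (tokens : List String) : List (String × String) :=
  (tokens.foldl (fun mapping tok =>
    let t := PySem.Str.lower tok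
    if PySem.Set.contains (PySem.Set.ofList ["pakistan", "hukumat", "wazir", "siyasat"]) t then
      mapping.insert tok "politics"
    else if PySem.Set.contains (PySem.Set.ofList ["cricket", "match", "team", "player"]) t then
      mapping.insert tok "sports"
    else if PySem.Set.contains (PySem.Set.ofList ["shehar", "lahore", "karachi", "islamabad"]) t then
      mapping.insert tok "geography"
    else
      mapping.insert tok "other") (PySem.Dict.empty : PySem.Dict String String)).items

-- ===== PORT B =====
def pvGroups : List (String × PySem.Set String) :=
  [("politics", PySem.Set.ofList ["pakistan", "hukumat", "wazir", "siyasat"]),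
   ("sports", PySem.Set.ofList ["cricket", "match", "team", "player"]),
   ("geography", PySem.Set.ofList ["shehar", "lahore", "karachi", "islamabad"])]

def semantic_color_map_alt (tokens : List String) : List (String × String) :=
  let uniq := PySem.List.dedup tokens
  let labels0 := List.replicate uniq.length "other"
  let labels := pvGroups.foldl (fun labels gw =>
    (uniq.zip labels).map (fun p =>
      if PySem.Set.contains gw.2 (PySem.Str.lower p.1) then gw.1 else p.2)) labels0
  (PySem.Dict.ofList (uniq.zip labels)).items

-- ===== PRECONDITION & SPEC =====
def Spec_semantic_color_map (tokens : List String) (out : List (String × String)) : Prop := out = semantic_color_map_alt tokens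
instance (tokens : List String) (out : List (String × String)) : Decidable (Spec_semantic_color_map tokens out) := by unfold Spec_semantic_color_map; infer_instance

-- ===== CLAIM (what is proved, stated in full; the proofs are below) =====
def Claim_equal_semantic_color_map : Prop := ∀ (tokens : List String), Dom_semantic_color_map tokens → Spec_semantic_color_map tokens (semantic_color_map tokens)

-- ===== LEMMAS AND PROOFS =====

-- A's branch chain, as a function of the token (proof-side helper).
def pvCatA (tok : String) : String :=
  let t := PySem.Str.lower tok
  if PySem.Set.contains (PySem.Set.ofList ["pakistan", "hukumat", "wazir", "siyasat"]) t then "politics"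
  else if PySem.Set.contains (PySem.Set.ofList ["cricket", "match", "team", "player"]) t then "sports"
  else if PySem.Set.contains (PySem.Set.ofList ["shehar", "lahore", "karachi", "islamabad"]) t then "geography"
  else "other"

-- B's composed pass result, as a function of the token (proof-side helper).
def pvCatB (tok : String) : String :=
  let t := PySem.Str.lower tok
  if PySem.Set.contains (PySem.Set.ofList ["shehar", "lahore", "karachi", "islamabad"]) t then "geography"
  else if PySem.Set.contains (PySem.Set.ofList ["cricket", "match", "team", "player"]) t then "sports"
  else if PySem.Set.contains (PySem.Set.ofList ["pakistan", "hukumat", "wazir", "siyasat"]) t then "politics"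
  else "other"

-- The keyword sets are disjoint, so A's and B's branch orders agree.
theorem pvCat_eq (tok : String) : pvCatA tok = pvCatB tok := by
  unfold pvCatA pvCatB
  generalize PySem.Str.lower tok = t
  by_cases h1 : t = "pakistan"; · subst h1; decide
  by_cases h2 : t = "hukumat"; · subst h2; decide
  by_cases h3 : t = "wazir"; · subst h3; decide
  by_cases h4 : t = "siyasat"; · subst h4; decide
  by_cases h5 : t = "cricket"; · subst h5; decide
  by_cases h6 : t = "match"; · subst h6; decide
  by_cases h7 : t = "team"; · subst h7; decide
  by_cases h8 : t = "player"; · subst h8; decide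
  by_cases h9 : t = "shehar"; · subst h9; decide
  by_cases h10 : t = "lahore"; · subst h10; decide
  by_cases h11 : t = "karachi"; · subst h11; decide
  by_cases h12 : t = "islamabad"; · subst h12; decide
  simp [PySem.Set.contains, PySem.Set.ofList, PySem.Set.add,
    h1, h2, h3, h4, h5, h6, h7, h8, h9, h10, h11, h12]

-- A's insert loop with a value depending only on the key: items = dedup keys, paired with f.
theorem pv_foldl_insert_fn (f : String → String) :
    ∀ (tokens ys : List String), ys.Nodup →
      ((tokens.foldl (fun d tok => d.insert tok (f tok))
          (PySem.Dict.mk (ys.map (fun t => (t, f t))))).items)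
        = (PySem.Set.update ys tokens).map (fun t => (t, f t)) := by
  intro tokens
  induction tokens with
  | nil => intro ys _; simp [PySem.Set.update]
  | cons t ts ih =>
    intro ys hnd
    have hkeys : (PySem.Dict.mk (ys.map (fun t => (t, f t)))).keys = ys := by
      simp [PySem.Dict.keys, Function.comp_def]
    by_cases hmem : t ∈ ys
    · have hc : (PySem.Dict.mk (ys.map (fun t => (t, f t)))).contains t = true := by
        rw [PySem.Dict.contains_eq_decide_mem_keys, hkeys]; simp [hmem]
      have hins : (PySem.Dict.mk (ys.map (fun t => (t, f t)))).insert t (f t)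
          = PySem.Dict.mk (ys.map (fun y => (y, f y))) := by
        apply PySem.Dict.ext
        rw [PySem.Dict.items_insert_of_contains _ _ hc]
        simp only [List.map_map]
        apply List.map_congr_left
        intro y _
        by_cases hy : y = t
        · subst hy; simp
        · simp [Function.comp, beq_eq_false_iff_ne.mpr hy]
      have hadd : PySem.Set.add ys t = ys := by
        simp [PySem.Set.add, List.contains_eq_mem, hmem]
      simp only [List.foldl_cons, hins]
      rw [ih ys hnd]
      simp [PySem.Set.update, hadd]
    · have hc : (PySem.Dict.mk (ys.map (fun t => (t, f t)))).contains t = false := by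
        rw [PySem.Dict.contains_eq_decide_mem_keys, hkeys]; simp [hmem]
      have hins : (PySem.Dict.mk (ys.map (fun t => (t, f t)))).insert t (f t)
          = PySem.Dict.mk ((ys ++ [t]).map (fun y => (y, f y))) := by
        apply PySem.Dict.ext
        rw [PySem.Dict.items_insert_of_not_contains _ _ hc]
        simp
      have hadd : PySem.Set.add ys t = ys ++ [t] := by
        simp [PySem.Set.add, List.contains_eq_mem, hmem]
      have hnd' : (ys ++ [t]).Nodup := by
        simp [List.nodup_append, hnd]
        intro a ha hat
        exact hmem (hat ▸ ha)
      simp only [List.foldl_cons, hins]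
      rw [ih (ys ++ [t]) hnd']
      simp [PySem.Set.update, hadd]

-- One relabeling pass over zip(uniq, uniq.map h) is a pointwise map over uniq.
theorem pv_pass (l : List String) (h : String → String) (S : PySem.Set String) (cat : String) :
    ((l.zip (l.map h)).map (fun p =>
        if PySem.Set.contains S (PySem.Str.lower p.1) then cat else p.2))
      = l.map (fun t => if PySem.Set.contains S (PySem.Str.lower t) then cat else h t) := by
  induction l with
  | nil => rfl
  | cons x xs ih =>
    simp only [List.map_cons, List.zip_cons_cons]
    rw [ih]

-- zip of a list with a map over itself is a pointwise pairing.
theorem pv_zip_map (l : List String) (h : String → String) :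
    l.zip (l.map h) = l.map (fun t => (t, h t)) := by
  induction l with
  | nil => rfl
  | cons x xs ih => simp [ih]

-- dict(pairs) on nodup keys keeps exactly the pairs list.
theorem pv_items_ofList (l : List String) (g : String → String) (hnd : l.Nodup) :
    (PySem.Dict.ofList (l.map (fun t => (t, g t)))).items = l.map (fun t => (t, g t)) := by
  unfold PySem.Dict.ofList PySem.Dict.update
  rw [List.foldl_map]
  have := PySem.Dict.items_foldl_insert_fresh l (fun t => t) g
      (PySem.Dict.empty : PySem.Dict String String)
      (fun a _ => PySem.Dict.contains_empty a) (by simpa using hnd)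
  simpa using this

-- ===== VERDICT (by name: the statement is the Claim_ definition above) =====
theorem semantic_color_map_spec : Claim_equal_semantic_color_map := by
  intro tokens _
  unfold Spec_semantic_color_map semantic_color_map semantic_color_map_alt
  -- rewrite A's loop body as insert of pvCatA
  have hstepA :
      (fun (mapping : PySem.Dict String String) (tok : String) =>
        let t := PySem.Str.lower tok
        if PySem.Set.contains (PySem.Set.ofList ["pakistan", "hukumat", "wazir", "siyasat"]) t then
          mapping.insert tok "politics"
        else if PySem.Set.contains (PySem.Set.ofList ["cricket", "match", "team", "player"]) t then
          mapping.insert tok "sports"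
        else if PySem.Set.contains (PySem.Set.ofList ["shehar", "lahore", "karachi", "islamabad"]) t then
          mapping.insert tok "geography"
        else
          mapping.insert tok "other") =
      (fun (mapping : PySem.Dict String String) (tok : String) =>
        mapping.insert tok (pvCatA tok)) := by
    funext mapping tok
    unfold pvCatA
    simp only []
    split_ifs <;> rfl
  rw [hstepA]
  -- A side: items = dedup, paired with pvCatA
  have hA : (tokens.foldl (fun d tok => d.insert tok (pvCatA tok))
        (PySem.Dict.empty : PySem.Dict String String)).items
      = (PySem.List.dedup tokens).map (fun t => (t, pvCatA t)) := by
    have := pv_foldl_insert_fn pvCatA tokens [] List.nodup_nil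
    simpa [PySem.Dict.empty, PySem.Set.update, PySem.List.dedup_eq_ofList,
      PySem.Set.ofList_eq_foldl] using this
  rw [hA]
  -- B side
  set uniq := PySem.List.dedup tokens with huniq
  have hrepl : List.replicate uniq.length "other" = uniq.map (fun _ => "other") := by
    simp
  have hlabels :
      pvGroups.foldl (fun labels gw =>
        (uniq.zip labels).map (fun p =>
          if PySem.Set.contains gw.2 (PySem.Str.lower p.1) then gw.1 else p.2))
        (List.replicate uniq.length "other")
      = uniq.map pvCatB := by
    rw [hrepl]
    simp only [pvGroups, List.foldl_cons, List.foldl_nil]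
    simp only [pv_pass]
    apply List.map_congr_left
    intro t _
    simp [pvCatB]
  simp only [hlabels]
  rw [pv_zip_map]
  rw [pv_items_ofList uniq pvCatB (PySem.List.nodup_dedup tokens)]
  apply List.map_congr_left
  intro t _
  rw [pvCat_eq]
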